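-- pv_equiv track=rewrite | github.com/miliar/Code_Jam_Webscraper | Solutions_in_python/Problem_155/s_ovation.py | added_frd
-- ===== SOURCE A (Python) =====
-- def added_frd(ls):
-- 	if len(ls) > 0:
-- 		#granted = int(ls[0])
-- 		granted = 0
-- 		added = 0
-- 	else:
-- 		return
-- 	for s in range(len(ls)):
-- 		if s > granted :
-- 			if int(ls[s]) != 0:
-- 				added += s - granted
-- 				granted += s - granted
-- 		granted += int(ls[s])
-- 		#print 'shyness : ', s, 'nb : ', ls[s],'granted : ', granted, 'added : ', added
-- 	return added
-- ===== SOURCE B (Python) =====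
-- def _deficits(vals, i, prefix):
--     # deficits i - prefix_i for every nonzero level i in vals[i:], built recursively
--     if i == len(vals):
--         return []
--     rest = _deficits(vals, i + 1, prefix + vals[i])
--     if vals[i] != 0:
--         return [i - prefix] + rest
--     return rest
--
-- def added_frd(ls):
--     if not ls:
--         return
--     return max([0] + _deficits([int(s) for s in ls], 0, 0))
-- ===== Notes on version B (the rewrite author's own statement) =====
-- stated objective: alternative
-- what changed: B replaces A's iterative corrective-increment simulation with a recursive helper that builds the explicit list of deficits i - prefix_i at nonzero levels, then returns the built-in max of that list together with 0.
-- outside the precondition, e.g. on added_frd([]): A returns None, B returns None; on added_frd(['x']): A raises ValueError, B raises ValueError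
import Mathlib
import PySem

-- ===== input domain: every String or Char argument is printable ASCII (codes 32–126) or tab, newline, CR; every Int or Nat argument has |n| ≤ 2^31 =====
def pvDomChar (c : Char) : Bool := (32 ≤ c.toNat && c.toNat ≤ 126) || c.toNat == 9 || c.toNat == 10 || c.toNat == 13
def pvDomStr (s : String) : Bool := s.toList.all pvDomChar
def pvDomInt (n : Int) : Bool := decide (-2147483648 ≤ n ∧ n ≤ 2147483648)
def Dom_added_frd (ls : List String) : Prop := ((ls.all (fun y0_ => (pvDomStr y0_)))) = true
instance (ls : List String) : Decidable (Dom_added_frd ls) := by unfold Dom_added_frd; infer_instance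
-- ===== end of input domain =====

-- ===== PORT A =====
-- B recursively materialises the deficit list and takes its built-in max, instead of
-- A's iterative (granted, added) corrective-increment simulation. Same cost;
-- equivalence proved on inputs where every string parses as an int and the list is
-- non-empty (else A raises / returns None).

-- int(s); Pre_ guarantees the parse succeeds, so the default is never taken inside Pre_
def pyint (s : String) : Int := (PySem.Int.ofStr? s).getD 0

-- one iteration of A's loop body; state = (granted, added); j is the index s
def addedStepA (ls : List String) (st : Int × Int) (j : Int) : Int × Int :=
  let granted := st.1
  let added := st.2
  let (granted, added) :=
    if j > granted then
      if pyint (PySem.List.pyGetD ls j "") ≠ 0 then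
        (granted + (j - granted), added + (j - granted))
      else (granted, added)
    else (granted, added)
  (granted + pyint (PySem.List.pyGetD ls j ""), added)

def added_frd (ls : List String) : Int :=
  if ls.length > 0 then
    -- granted = 0; added = 0; for s in range(len(ls)): …  (index always in range)
    ((PySem.List.pyRange 0 ls.length 1).foldl (addedStepA ls) (0, 0)).2
  else 0  -- Python returns None here; excluded by Pre_added_frd

-- ===== PORT B =====
-- _deficits(vals, i, prefix): Python recurses on the index i into vals; ported as the
-- same recursion on the remaining suffix vals[i:], carrying i and prefix along.
def deficitsB : List Int → Int → Int → List Int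
  | [], _, _ => []
  | v :: t, i, p =>
    let rest := deficitsB t (i + 1) (p + v)
    if v ≠ 0 then (i - p) :: rest else rest

def added_frd_alt (ls : List String) : Int :=
  if ls = [] then 0  -- Python returns None here; excluded by Pre_added_frd
  else
    -- max([0] + _deficits([int(s) for s in ls], 0, 0))
    (PySem.List.max? ((0 : Int) :: deficitsB (ls.map pyint) 0 0) (fun y => y)).getD 0

-- ===== PRECONDITION & SPEC =====
-- Pre_ excludes the empty list (A executes a bare 'return', i.e. returns None, not an
-- int) and lists with a string int() cannot parse (A raises ValueError).
def Pre_added_frd (ls : List String) : Prop :=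
  ls ≠ [] ∧ ∀ s ∈ ls, (PySem.Int.ofStr? s).isSome = true
instance (ls : List String) : Decidable (Pre_added_frd ls) := by unfold Pre_added_frd; infer_instance
def pvWitness_added_frd : List String := (["1", "0", "2"])
def Spec_added_frd (ls : List String) (out : Int) : Prop := out = added_frd_alt ls
instance (ls : List String) (out : Int) : Decidable (Spec_added_frd ls out) := by unfold Spec_added_frd; infer_instance

-- ===== CLAIM (what is proved, stated in full; the proofs are below) =====
def Claim_equal_added_frd : Prop := ∀ (ls : List String), Dom_added_frd ls → Pre_added_frd ls → Spec_added_frd ls (added_frd ls)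

-- ===== LEMMAS AND PROOFS =====

-- proof-side running-max fold: A's loop state (granted, added) is (pfx + best, best)
-- of this fold's state, and this fold in turn computes the max of the deficit list
def addedStepB (st : Int × Int) (iv : Int × Int) : Int × Int :=
  let pfx := st.1
  let best := st.2
  let best := if iv.2 ≠ 0 ∧ iv.1 - pfx > best then iv.1 - pfx else best
  (pfx + iv.2, best)

theorem stepAB (ls : List String) (ds : List (Int × Int))
    (hmem : ∀ p ∈ ds, pyint (PySem.List.pyGetD ls p.1 "") = p.2) :
    ∀ (p b : Int),
      ds.foldl (fun st iv => addedStepA ls st iv.1) (p + b, b)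
        = ((ds.foldl addedStepB (p, b)).1 + (ds.foldl addedStepB (p, b)).2,
           (ds.foldl addedStepB (p, b)).2) := by
  induction ds with
  | nil => intro p b; simp
  | cons d t ih =>
    intro p b
    have hd := hmem d (by simp)
    have ht : ∀ p ∈ t, pyint (PySem.List.pyGetD ls p.1 "") = p.2 := by
      intro q hq; exact hmem q (by simp [hq])
    have hstepA : addedStepA ls (p + b, b) d.1
        = ((addedStepB (p, b) d).1 + (addedStepB (p, b) d).2, (addedStepB (p, b) d).2) := by
      simp only [addedStepA, addedStepB, hd]
      split_ifs <;> simp only [Prod.mk.injEq, and_true] <;> omega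
    simp only [List.foldl_cons, hstepA]
    rw [ih ht, Prod.mk.eta]

-- the running-max fold over enumerate computes the max of the deficit list
theorem foldB_deficits (vals : List Int) :
    ∀ (i p b : Int),
      (PySem.List.enumerate vals i).foldl addedStepB (p, b)
        = (p + vals.sum, (deficitsB vals i p).foldl max b) := by
  induction vals with
  | nil => intro i p b; simp [deficitsB, PySem.List.enumerate_nil]
  | cons v t ih =>
    intro i p b
    rw [PySem.List.enumerate_cons, List.foldl_cons]
    have hstep : addedStepB (p, b) (i, v)
        = (p + v, if v ≠ 0 then max b (i - p) else b) := by
      simp only [addedStepB]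
      split_ifs <;> simp_all <;> omega
    rw [hstep, ih]
    simp only [deficitsB, List.sum_cons, Prod.mk.injEq]
    refine ⟨by ring, ?_⟩
    split_ifs <;> simp

-- ===== VERDICT (by name: the statement is the Claim_ definition above) =====
theorem added_frd_spec : Claim_equal_added_frd := by
  intro ls hdom hpre
  unfold Spec_added_frd added_frd added_frd_alt
  obtain ⟨hne, _⟩ := hpre
  have hlen : ls.length > 0 := List.length_pos_of_ne_nil hne
  rw [if_pos hlen, if_neg hne]
  have hmem : ∀ p ∈ PySem.List.enumerate (ls.map pyint) 0,
      pyint (PySem.List.pyGetD ls p.1 "") = p.2 := by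
    intro p hp
    rcases (PySem.List.mem_enumerate_iff _ _ _).mp hp with ⟨k, hk, rfl⟩
    have hk' : k < ls.length := by simpa using hk
    simp [PySem.List.pyGetD_natCast, List.getD_eq_getElem?_getD, hk']
  have hrange : PySem.List.pyRange 0 (ls.length : Int) 1
      = (PySem.List.enumerate (ls.map pyint) 0).map (·.1) := by
    rw [PySem.List.map_fst_enumerate]; simp
  rw [hrange, List.foldl_map]
  have hA := stepAB ls (PySem.List.enumerate (ls.map pyint) 0) hmem 0 0
  have hB := foldB_deficits (ls.map pyint) 0 0 0
  rw [PySem.List.max?_id_cons]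
  simpa [hB] using congrArg Prod.snd hA
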